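-- pv_equiv track=rewrite | github.com/johnsamuelwrites/mlscores | mlscores/scores.py | get_missing_translations
-- ===== SOURCE A (Python) =====
-- def get_missing_translations(properties, languages):
--     """
--     Find properties that do not have translations in the given languages.
--
--     This function takes a list of properties with their corresponding languages and returns a dictionary
--     where the keys are the properties and the values are the languages that do not have translations.
--
--     Args:
--         properties (list): A list of tuples containing the property, its value, and its language.
--         languages (list): A list of languages to check for translations.
--
--     Returns:
--         A dictionary where the keys are the properties and the values are the languages that do not have translations.
--
--     Notes:
--         This function uses a set to store unique properties and a dictionary to store the translations for each property.
--     """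
--     # Use a set to store unique properties
--     unique_properties = set(prop for prop, _, _ in properties)
--
--     # Use a dictionary to store the translations for each property
--     property_translations = {}
--     for prop, _, lang in properties:
--         if prop not in property_translations:
--             property_translations[prop] = set()
--         property_translations[prop].add(lang)
--
--     # Find properties that do not have translations in the given languages
--     missing_translations = {}
--     for prop, translations in property_translations.items():
--         missing_languages = set(languages) - translations
--         if missing_languages:
--             missing_translations[prop] = missing_languages
--
--     return missing_translations
-- ===== SOURCE B (Python) =====
-- def get_missing_translations(properties, languages):
--     # Recursive partition: take the first property's group out of the list,
--     # compute its gap directly, and recurse on the remaining entries.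
--     if not properties:
--         return {}
--     prop = properties[0][0]
--     group = [t[2] for t in properties if t[0] == prop]
--     rest = [t for t in properties if t[0] != prop]
--     gap = {lang for lang in languages if lang not in group}
--     result = {prop: gap} if gap else {}
--     result.update(get_missing_translations(rest, languages))
--     return result
-- ===== Notes on version B (the rewrite author's own statement) =====
-- stated objective: alternative
-- what changed: A builds a hash index (dict of per-property translation sets) in one pass and then subtracts each set from set(languages); B uses no index at all: it recurses on the list, splitting off the whole group of the first property, computing its gap by direct membership tests, and recursing on the remaining entries.
import Mathlib
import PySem

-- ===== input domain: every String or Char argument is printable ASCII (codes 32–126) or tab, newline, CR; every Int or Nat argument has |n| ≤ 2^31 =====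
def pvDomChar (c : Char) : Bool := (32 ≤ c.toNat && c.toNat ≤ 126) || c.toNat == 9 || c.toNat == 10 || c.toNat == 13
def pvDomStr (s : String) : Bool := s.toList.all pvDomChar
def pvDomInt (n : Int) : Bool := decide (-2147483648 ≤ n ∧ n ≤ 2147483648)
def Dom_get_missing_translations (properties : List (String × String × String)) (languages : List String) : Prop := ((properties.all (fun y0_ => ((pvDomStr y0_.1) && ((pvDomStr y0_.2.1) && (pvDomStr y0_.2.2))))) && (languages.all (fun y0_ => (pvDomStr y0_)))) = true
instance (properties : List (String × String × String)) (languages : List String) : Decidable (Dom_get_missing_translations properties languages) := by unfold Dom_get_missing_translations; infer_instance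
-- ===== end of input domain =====

-- B replaces A's dict-of-sets hash index by a recursion that splits off the first property's
-- whole group and recurses on the remaining entries. (objective: alternative)

-- ===== PORT A =====
def get_missing_translations (properties : List (String × String × String)) (languages : List String) : List (String × List String) :=
  let _unique_properties : PySem.Set String := PySem.Set.ofList (properties.map (fun t => t.1))
  let property_translations : PySem.Dict String (List String) :=
    properties.foldl (fun d t =>
      let d := if d.contains t.1 then d else d.insert t.1 PySem.Set.empty
      d.modify t.1 PySem.Set.empty (fun s => PySem.Set.add s t.2.2)) PySem.Dict.empty
  let missing_translations : PySem.Dict String (List String) :=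
    property_translations.items.foldl (fun m pt =>
      let missing_languages := PySem.Set.diff (PySem.Set.ofList languages) pt.2
      if missing_languages ≠ [] then m.insert pt.1 missing_languages else m) PySem.Dict.empty
  missing_translations.items

-- ===== PORT B =====
def get_missing_translations_alt (properties : List (String × String × String)) (languages : List String) : List (String × List String) :=
  match properties with
  | [] => []
  | t :: ts =>
    let prop := t.1
    let group := ((t :: ts).filter (fun u => u.1 == prop)).map (fun u => u.2.2)
    let rest := (t :: ts).filter (fun u => !(u.1 == prop))
    let gap : PySem.Set String := PySem.Set.ofList (languages.filter (fun lang => !(group.contains lang)))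
    let result : PySem.Dict String (List String) :=
      if gap ≠ [] then (PySem.Dict.empty : PySem.Dict String (List String)).insert prop gap
      else PySem.Dict.empty
    let result := (get_missing_translations_alt rest languages).foldl
      (fun d kv => d.insert kv.1 kv.2) result
    result.items
termination_by properties.length
decreasing_by
  simp only [List.filter_cons, beq_self_eq_true, Bool.not_true, Bool.false_eq_true, if_false,
    List.length_cons]
  exact Nat.lt_succ_of_le (List.length_filter_le _ _)

-- ===== PRECONDITION & SPEC =====
def Spec_get_missing_translations (properties : List (String × String × String)) (languages : List String) (out : List (String × List String)) : Prop := out = get_missing_translations_alt properties languages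
instance (properties : List (String × String × String)) (languages : List String) (out : List (String × List String)) : Decidable (Spec_get_missing_translations properties languages out) := by unfold Spec_get_missing_translations; infer_instance

-- ===== CLAIM (what is proved, stated in full; the proofs are below) =====
def Claim_equal_get_missing_translations : Prop := ∀ (properties : List (String × String × String)) (languages : List String), Dom_get_missing_translations properties languages → Spec_get_missing_translations properties languages (get_missing_translations properties languages)

-- ===== LEMMAS AND PROOFS =====

-- the per-property gap both programs compute, as a function of the property name
def pvGap (properties : List (String × String × String)) (languages : List String) (p : String) : List String :=
  PySem.Set.ofList (languages.filter (fun lang =>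
    !(((properties.filter (fun u => u.1 == p)).map (fun u => u.2.2)).contains lang)))

-- the common canonical result: one entry per key with a non-empty gap
def pvC (ks : List String) (v : String → List String) : List (String × List String) :=
  ks.flatMap (fun p => if v p ≠ [] then [(p, v p)] else [])

theorem pvC_nil (v : String → List String) : pvC [] v = [] := rfl

theorem pvC_cons (k : String) (ks : List String) (v : String → List String) :
    pvC (k :: ks) v = (if v k ≠ [] then [(k, v k)] else []) ++ pvC ks v := by
  simp [pvC]

theorem pvC_congr (ks : List String) (v w : String → List String)
    (h : ∀ p ∈ ks, v p = w p) : pvC ks v = pvC ks w := by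
  induction ks with
  | nil => rfl
  | cons k ks ih =>
    rw [pvC_cons, pvC_cons, h k (by simp), ih (fun p hp => h p (by simp [hp]))]

theorem pvC_keys (ks : List String) (v : String → List String) :
    (pvC ks v).map Prod.fst = ks.filter (fun p => !(v p).isEmpty) := by
  induction ks with
  | nil => rfl
  | cons k ks ih =>
    rw [pvC_cons, List.map_append, ih, List.filter_cons]
    by_cases h : v k = []
    · simp [h]
    · simp [h, List.isEmpty_eq_false_iff]

-- set(xs) commutes with filtering by a predicate
theorem pv_ofList_filter {α : Type} [BEq α] [LawfulBEq α] (q : α → Bool) (xs : List α) :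
    (PySem.Set.ofList xs).filter q = PySem.Set.ofList (xs.filter q) := by
  induction xs using List.reverseRecOn with
  | nil => rfl
  | append_singleton xs x ih =>
    rw [PySem.Set.ofList_append, List.filter_append]
    show ((PySem.Set.ofList xs).add x).filter q = _
    by_cases hx : x ∈ PySem.Set.ofList xs
    · rw [PySem.Set.add_of_mem hx]
      rw [ih]
      by_cases hq : q x = true
      · have hmem : x ∈ PySem.Set.ofList (xs.filter q) := by
          rw [PySem.Set.mem_ofList]
          rw [PySem.Set.mem_ofList] at hx
          exact List.mem_filter.mpr ⟨hx, hq⟩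
        rw [PySem.Set.ofList_append]
        show _ = (PySem.Set.ofList (xs.filter q)).update (List.filter q [x])
        simp [List.filter, hq, PySem.Set.update, PySem.Set.add_of_mem hmem]
      · simp [List.filter, hq]
    · rw [PySem.Set.add_of_not_mem hx, List.filter_append, ih]
      rw [PySem.Set.ofList_append]
      show _ = (PySem.Set.ofList (xs.filter q)).update (List.filter q [x])
      by_cases hq : q x = true
      · have hmem : x ∉ PySem.Set.ofList (xs.filter q) := by
          rw [PySem.Set.mem_ofList]
          rw [PySem.Set.mem_ofList] at hx
          exact fun h => hx (List.mem_filter.mp h).1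
        simp [List.filter, hq, PySem.Set.update, PySem.Set.add_of_not_mem hmem]
      · simp [List.filter, hq, PySem.Set.update]

theorem pv_discard_ofList (xs : List String) (x : String) :
    PySem.Set.discard (PySem.Set.ofList xs) x = PySem.Set.ofList (xs.filter (fun y => !(y == x))) := by
  show (PySem.Set.ofList xs).filter (fun y => !(y == x)) = _
  rw [pv_ofList_filter]

-- map fst commutes with B's partition filter
theorem pv_map_fst_filter (ts : List (String × String × String)) (x : String) :
    ((ts.filter (fun u => !(u.1 == x))).map (fun t => t.1))
      = (ts.map (fun t => t.1)).filter (fun y => !(y == x)) := by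
  rw [List.filter_map]
  congr 1

-- removing another property's entries does not change a property's gap
theorem pv_gap_filter (ps : List (String × String × String)) (languages : List String)
    (x p : String) (hpx : p ≠ x) :
    pvGap (ps.filter (fun u => !(u.1 == x))) languages p = pvGap ps languages p := by
  unfold pvGap
  rw [List.filter_filter]
  have h2 : List.filter (fun a => a.1 == p && !(a.1 == x)) ps
      = List.filter (fun u => u.1 == p) ps := by
    apply List.filter_congr
    intro u _
    by_cases h : u.1 = p
    · simp [h, hpx]
    · simp [h]
  rw [h2]

-- A's set difference is the directly-computed gap
theorem pv_diff_eq_gap (ps : List (String × String × String)) (languages : List String) (p : String) :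
    PySem.Set.diff (PySem.Set.ofList languages)
        (PySem.Set.ofList ((ps.filter (fun t => t.1 == p)).map (fun t => t.2.2)))
      = pvGap ps languages p := by
  show (PySem.Set.ofList languages).filter _ = _
  rw [pv_ofList_filter]
  unfold pvGap
  congr 1
  apply List.filter_congr
  intro lang _
  congr 1
  rw [Bool.eq_iff_iff]
  rw [PySem.Set.contains_eq_listContains, List.contains_iff_mem, List.contains_iff_mem,
    PySem.Set.mem_ofList]

-- folding a conditional insert over fresh nodup keys appends the canonical entries
theorem pv_foldl_condInsert_items (v : String → List String) (ks : List String) :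
    ∀ (d : PySem.Dict String (List String)), ks.Nodup → (∀ k ∈ ks, d.contains k = false) →
    (ks.foldl (fun m p => if v p ≠ [] then m.insert p (v p) else m) d).items
      = d.items ++ pvC ks v := by
  induction ks with
  | nil => intro d _ _; simp [pvC_nil]
  | cons k ks ih =>
    intro d hnd hfresh
    rw [List.foldl_cons, pvC_cons]
    by_cases hv : v k = []
    · rw [if_neg (by simp [hv]), ih d hnd.of_cons (fun k' hk' => hfresh k' (by simp [hk']))]
      simp [hv]
    · rw [if_pos hv]
      have hk : d.contains k = false := hfresh k (by simp)
      have hfresh' : ∀ k' ∈ ks, (d.insert k (v k)).contains k' = false := by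
        intro k' hk'
        rw [PySem.Dict.contains_insert]
        have hne : k' ≠ k := fun h => (List.nodup_cons.mp hnd).1 (h ▸ hk')
        simp [hne, hfresh k' (by simp [hk'])]
      rw [ih _ hnd.of_cons hfresh', PySem.Dict.items_insert_of_not_contains _ _ hk]
      simp [hv]

-- folding plain inserts of fresh nodup-keyed items appends them
theorem pv_foldl_insert_items (its : List (String × List String)) :
    ∀ (d : PySem.Dict String (List String)), (its.map Prod.fst).Nodup →
    (∀ k ∈ its.map Prod.fst, d.contains k = false) →
    (its.foldl (fun d kv => d.insert kv.1 kv.2) d).items = d.items ++ its := by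
  induction its with
  | nil => intro d _ _; simp
  | cons kv its ih =>
    intro d hnd hfresh
    rw [List.foldl_cons]
    have hk : d.contains kv.1 = false := hfresh kv.1 (by simp)
    have hfresh' : ∀ k' ∈ its.map Prod.fst, (d.insert kv.1 kv.2).contains k' = false := by
      intro k' hk'
      rw [PySem.Dict.contains_insert]
      have hne : k' ≠ kv.1 := fun h => (List.nodup_cons.mp (by simpa using hnd)).1 (h ▸ hk')
      simp [hne, hfresh k' (by simp [hk'])]
    rw [ih _ (by simpa using hnd.of_cons) hfresh',
      PySem.Dict.items_insert_of_not_contains _ _ hk]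
    simp

-- getD of one step of A's translation-collecting loop
theorem pv_stepA_getD (d : PySem.Dict String (List String)) (t : String × String × String) (p : String) :
    ((if d.contains t.1 then d else d.insert t.1 PySem.Set.empty).modify t.1 PySem.Set.empty
        (fun s => PySem.Set.add s t.2.2)).getD p []
      = if t.1 = p then PySem.Set.add (d.getD p []) t.2.2 else d.getD p [] := by
  have hempty : (PySem.Set.empty : PySem.Set String) = ([] : List String) := rfl
  by_cases hc : d.contains t.1 = true
  · rw [if_pos hc, hempty, PySem.Dict.getD_modify]
    by_cases hp : t.1 = p
    · rw [if_pos hp.symm, if_pos hp, hp]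
    · rw [if_neg (Ne.symm hp), if_neg hp]
  · rw [if_neg hc, hempty, PySem.Dict.getD_modify]
    by_cases hp : t.1 = p
    · rw [hp] at hc
      rw [if_pos hp.symm, if_pos hp, hp, PySem.Dict.getD_insert_self,
        PySem.Dict.getD_of_not_contains d [] (Bool.eq_false_iff.mpr hc)]
    · rw [if_neg (Ne.symm hp), if_neg hp, PySem.Dict.getD_insert_of_ne _ _ _ (Ne.symm hp)]

-- getD of A's translation-collecting loop
theorem pv_buildA_getD (properties : List (String × String × String)) (d : PySem.Dict String (List String)) (p : String) :
    (properties.foldl (fun d t =>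
        (if d.contains t.1 then d else d.insert t.1 PySem.Set.empty).modify t.1 PySem.Set.empty
          (fun s => PySem.Set.add s t.2.2)) d).getD p []
      = PySem.Set.update (d.getD p []) ((properties.filter (fun t => t.1 == p)).map (fun t => t.2.2)) := by
  induction properties generalizing d with
  | nil => rfl
  | cons t rest ih =>
    simp only [List.foldl_cons]
    rw [ih, pv_stepA_getD]
    by_cases hp : t.1 = p
    · rw [if_pos hp, List.filter_cons_of_pos (by simpa using hp), List.map_cons]
      rfl
    · rw [if_neg hp, List.filter_cons_of_neg (by simpa using hp)]

-- keys of one step of A's translation-collecting loop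
theorem pv_stepA_keys (d : PySem.Dict String (List String)) (t : String × String × String) :
    ((if d.contains t.1 then d else d.insert t.1 PySem.Set.empty).modify t.1 PySem.Set.empty
        (fun s => PySem.Set.add s t.2.2)).keys = PySem.Set.add d.keys t.1 := by
  by_cases hc : d.contains t.1 = true
  · rw [if_pos hc, PySem.Dict.keys_modify, PySem.Dict.keys_insert_of_contains d _ hc,
      PySem.Set.add_of_mem ((PySem.Dict.contains_iff_mem_keys d t.1).mp hc)]
  · have hcf : d.contains t.1 = false := Bool.eq_false_iff.mpr hc
    have hmem : t.1 ∉ d.keys := fun h => hc ((PySem.Dict.contains_iff_mem_keys d t.1).mpr h)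
    rw [if_neg hc, PySem.Dict.keys_modify,
      PySem.Dict.keys_insert_of_contains _ _ (by simp),
      PySem.Dict.keys_insert_of_not_contains d _ hcf, PySem.Set.add_of_not_mem hmem]

-- keys of A's translation-collecting loop
theorem pv_buildA_keys (properties : List (String × String × String)) (d : PySem.Dict String (List String)) :
    (properties.foldl (fun d t =>
        (if d.contains t.1 then d else d.insert t.1 PySem.Set.empty).modify t.1 PySem.Set.empty
          (fun s => PySem.Set.add s t.2.2)) d).keys
      = PySem.Set.update d.keys (properties.map (fun t => t.1)) := by
  induction properties generalizing d with
  | nil => rfl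
  | cons t rest ih =>
    simp only [List.foldl_cons, List.map_cons]
    rw [ih, pv_stepA_keys]
    rfl

-- A equals the canonical result
theorem pv_A_eq_canon (properties : List (String × String × String)) (languages : List String) :
    get_missing_translations properties languages
      = pvC (PySem.Set.ofList (properties.map (fun t => t.1))) (pvGap properties languages) := by
  unfold get_missing_translations
  simp only []
  have hkeys : (properties.foldl (fun d t =>
        (if d.contains t.1 then d else d.insert t.1 PySem.Set.empty).modify t.1 PySem.Set.empty
          (fun s => PySem.Set.add s t.2.2)) PySem.Dict.empty).keys
      = PySem.Set.ofList (properties.map (fun t => t.1)) := by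
    rw [pv_buildA_keys, PySem.Dict.keys_empty, PySem.Set.ofList_eq_foldl]; rfl
  have hnodup : (properties.foldl (fun d t =>
        (if d.contains t.1 then d else d.insert t.1 PySem.Set.empty).modify t.1 PySem.Set.empty
          (fun s => PySem.Set.add s t.2.2)) PySem.Dict.empty).keys.Nodup := by
    rw [hkeys]; exact PySem.Set.nodup_ofList _
  rw [PySem.Dict.items_eq_map_keys _ hnodup [], hkeys]
  have hval : ∀ p : String,
      (properties.foldl (fun d t =>
        (if d.contains t.1 then d else d.insert t.1 PySem.Set.empty).modify t.1 PySem.Set.empty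
          (fun s => PySem.Set.add s t.2.2)) PySem.Dict.empty).getD p []
      = PySem.Set.ofList ((properties.filter (fun t => t.1 == p)).map (fun t => t.2.2)) := by
    intro p
    rw [pv_buildA_getD, PySem.Dict.getD_empty, PySem.Set.ofList_eq_foldl]; rfl
  rw [List.foldl_map]
  simp only [hval, pv_diff_eq_gap]
  rw [pv_foldl_condInsert_items (pvGap properties languages) _ PySem.Dict.empty
    (PySem.Set.nodup_ofList _) (fun k _ => PySem.Dict.contains_empty k)]
  rfl

-- B equals the canonical result (strong induction via an explicit length bound)
theorem pv_B_eq_canon (languages : List String) :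
    ∀ (n : Nat) (ps : List (String × String × String)), ps.length ≤ n →
    get_missing_translations_alt ps languages
      = pvC (PySem.Set.ofList (ps.map (fun t => t.1))) (pvGap ps languages) := by
  intro n
  induction n with
  | zero =>
    intro ps h
    have : ps = [] := List.eq_nil_of_length_eq_zero (Nat.le_zero.mp h)
    subst this
    rw [get_missing_translations_alt]
    rfl
  | succ n ih =>
    intro ps h
    match ps with
    | [] => rw [get_missing_translations_alt]; rfl
    | t :: ts =>
      rw [get_missing_translations_alt]
      have hrest : (t :: ts).filter (fun u => !(u.1 == t.1)) = ts.filter (fun u => !(u.1 == t.1)) := by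
        simp
      have hrest_len : ((t :: ts).filter (fun u => !(u.1 == t.1))).length ≤ n := by
        rw [hrest]
        exact Nat.le_trans (List.length_filter_le _ _) (Nat.le_of_succ_le_succ h)
      have hB := ih _ hrest_len
      -- members of the rest's key set differ from t.1
      have hrest_ne : ∀ p ∈ PySem.Set.ofList
          (((t :: ts).filter (fun u => !(u.1 == t.1))).map (fun u => u.1)), p ≠ t.1 := by
        intro p hp
        rw [PySem.Set.mem_ofList] at hp
        obtain ⟨u, hu, hup⟩ := List.mem_map.mp hp
        have := (List.mem_filter.mp hu).2
        simp only [Bool.not_eq_eq_eq_not, Bool.not_true, beq_eq_false_iff_ne] at this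
        exact hup ▸ this
      set gap := PySem.Set.ofList (languages.filter (fun lang =>
        !((((t :: ts).filter (fun u => u.1 == t.1)).map (fun u => u.2.2)).contains lang))) with hgap
      have hgap_eq : gap = pvGap (t :: ts) languages t.1 := rfl
      set d0 := if gap ≠ [] then (PySem.Dict.empty : PySem.Dict String (List String)).insert t.1 gap
        else PySem.Dict.empty with hd0
      have hfresh : ∀ k ∈ (get_missing_translations_alt ((t :: ts).filter (fun u => !(u.1 == t.1)))
          languages).map Prod.fst, d0.contains k = false := by
        intro k hk
        rw [hB, pvC_keys] at hk
        have hkne : k ≠ t.1 := hrest_ne k (List.mem_of_mem_filter hk)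
        rw [hd0]
        by_cases hg : gap ≠ []
        · rw [if_pos hg, PySem.Dict.contains_insert]
          simp [hkne]
        · rw [if_neg hg]
          exact PySem.Dict.contains_empty k
      have hnodup : ((get_missing_translations_alt ((t :: ts).filter (fun u => !(u.1 == t.1)))
          languages).map Prod.fst).Nodup := by
        rw [hB, pvC_keys]
        exact (PySem.Set.nodup_ofList _).filter _
      rw [pv_foldl_insert_items _ d0 hnodup hfresh]
      have hd0items : d0.items = if pvGap (t :: ts) languages t.1 ≠ []
          then [(t.1, pvGap (t :: ts) languages t.1)] else [] := by
        rw [hd0, ← hgap_eq]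
        by_cases hg : gap ≠ []
        · rw [if_pos hg, if_pos hg]; rfl
        · rw [if_neg hg, if_neg hg]; rfl
      rw [hd0items, hB]
      -- now rewrite the right-hand canonical form
      rw [List.map_cons, PySem.Set.ofList_cons, pv_discard_ofList, pvC_cons]
      congr 1
      rw [hrest, pv_map_fst_filter]
      refine (pvC_congr _ _ _ (fun p hp => ?_)).symm
      have hpne : p ≠ t.1 := by
        rw [PySem.Set.mem_ofList, List.mem_filter] at hp
        simpa using hp.2
      have h1 := pv_gap_filter (t :: ts) languages t.1 p hpne
      rw [hrest] at h1
      exact h1.symm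

-- ===== VERDICT (by name: the statement is the Claim_ definition above) =====
theorem get_missing_translations_spec : Claim_equal_get_missing_translations := by
  unfold Claim_equal_get_missing_translations
  intro properties languages _
  unfold Spec_get_missing_translations
  rw [pv_A_eq_canon, pv_B_eq_canon languages properties.length properties (Nat.le_refl _)]
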